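-- pv_equiv track=rewrite | github.com/Benjir1/Elemi-programozasi-tetelek | ept/tetel7.py | csokkenorendezes
-- ===== SOURCE A (Python) =====
-- def csokkenorendezes(tomb, hatvany):
--     doit = True
--     hatvany += 1
--     hatar = 10 ** hatvany
--     if hatvany == 0:
--         doit = False
--     end = False
--     megoldas = []
--     i = 0
--     while end == False:
--         if i == hatar:
--             end = True
--             break
--         if i in tomb:
--             megoldas.append(i)
--             i += 1
--         if i not in tomb:
--             i += 1
--     if doit == True:
--         return f"A pozitív számok növekvő sorrendben: {megoldas[::-1]}"
--     elif doit == False: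
--         return "Sajnos nem helyes hatványt adtál meg. Kérlek próbáld újra!"
-- ===== SOURCE B (Python) =====
-- def csokkenorendezes(tomb, hatvany):
--     hatvany += 1
--     if hatvany <= 0:
--         return "Sajnos nem helyes hatványt adtál meg. Kérlek próbáld újra!"
--     hatar = 10 ** hatvany
--     vals = sorted({x for x in tomb if 0 <= x < hatar}, reverse=True)
--     return f"A pozitív számok növekvő sorrendben: {vals}"
-- ===== Notes on version B (the rewrite author's own statement) =====
-- stated objective: faster
-- what changed: B filters tomb once to the distinct values in [0, 10**(hatvany+1)) and sorts them descending, instead of A's counting loop that scans the whole list for every integer from 0 up to 10**(hatvany+1).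
-- intended difference: For hatvany <= -325 the float 10**(hatvany+1) underflows to exactly 0.0, so A accidentally returns 'A pozitív számok növekvő sorrendben: []' instead of rejecting the power; B returns the intended invalid-power message it gives for every non-positive power. — e.g. on csokkenorendezes([], -325): A returns "A pozitív számok növekvő sorrendben: []", B returns "Sajnos nem helyes hatványt adtál meg. Kérlek próbáld újra!"
import Mathlib
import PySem

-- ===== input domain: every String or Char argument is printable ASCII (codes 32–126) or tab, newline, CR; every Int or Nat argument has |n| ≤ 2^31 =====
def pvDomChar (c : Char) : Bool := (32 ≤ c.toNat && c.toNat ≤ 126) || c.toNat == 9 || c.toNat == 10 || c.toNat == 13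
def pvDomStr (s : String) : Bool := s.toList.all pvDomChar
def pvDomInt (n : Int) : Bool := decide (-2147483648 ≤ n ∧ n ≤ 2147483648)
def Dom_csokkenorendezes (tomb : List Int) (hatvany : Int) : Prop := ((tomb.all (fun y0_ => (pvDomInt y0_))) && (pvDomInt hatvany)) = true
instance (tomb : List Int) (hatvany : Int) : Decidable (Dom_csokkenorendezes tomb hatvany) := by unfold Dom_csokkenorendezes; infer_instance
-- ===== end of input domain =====

-- B replaces A's scan of tomb for every integer 0..10^(hatvany+1)-1 by one filter of tomb plus a
-- descending sort of the distinct filtered values (objective: faster, asymptotic).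

-- ===== PORT A =====
-- Python's repr of a list of ints, as used by the f-string: "[1, 2]"
def pvFmt (l : List Int) : String := "[" ++ String.intercalate ", " (l.map PySem.Int.toStr) ++ "]"

-- the while loop of A; fuel-driven because for inputs outside Pre_ the Python loop never terminates
-- (i can jump from hatar-1 to hatar+1 and never equal hatar again); inside Pre_ the fuel suffices.
def pvLoopA (tomb : List Int) (hatar : Int) : Nat → Int → List Int → List Int
  | 0, _, meg => meg
  | fuel+1, i, meg =>
    if i = hatar then meg
    else
      let p := if tomb.contains i then (meg ++ [i], i + 1) else (meg, i)
      let i2 := if ¬ tomb.contains p.2 then p.2 + 1 else p.2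
      pvLoopA tomb hatar fuel i2 p.1

def csokkenorendezes (tomb : List Int) (hatvany : Int) : String :=
  let doit := true
  let hatvany := hatvany + 1
  if hatvany < 0 then
    -- 10 ** hatvany is a FLOAT here: for hatvany ≤ -324 it underflows to exactly 0.0, the loop's exit
    -- test i == hatar fires at once and megoldas stays [] (exact there); for -324 ≤ hatvany < 0 the
    -- float is positive, the int counter never equals it and Python diverges (outside Pre_)
    "A pozitív számok növekvő sorrendben: " ++ pvFmt ([] : List Int).reverse
  else
    let hatar : Int := 10 ^ hatvany.toNat
    let doit := if hatvany = 0 then false else doit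
    let megoldas := pvLoopA tomb hatar (hatar.toNat + 2) 0 []
    if doit then
      -- megoldas[::-1] is List.reverse (PySem.List.slice?_none_none_neg_one)
      "A pozitív számok növekvő sorrendben: " ++ pvFmt megoldas.reverse
    else "Sajnos nem helyes hatványt adtál meg. Kérlek próbáld újra!"

-- ===== PORT B =====
def csokkenorendezes_alt (tomb : List Int) (hatvany : Int) : String :=
  let hatvany := hatvany + 1
  if hatvany ≤ 0 then "Sajnos nem helyes hatványt adtál meg. Kérlek próbáld újra!"
  else
    let hatar : Int := 10 ^ hatvany.toNat
    let vals := PySem.List.sorted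
      (PySem.Set.ofList (tomb.filter (fun x => decide (0 ≤ x) && decide (x < hatar))))
      (fun x => x) true
    "A pozitív számok növekvő sorrendben: " ++ pvFmt vals

-- ===== PRECONDITION & SPEC =====
-- Pre_ excludes exactly the inputs on which A never returns (infinite loop): -324 ≤ hatvany ≤ -2,
-- where 10**(hatvany+1) is a positive float the integer counter i never equals; and, for
-- -1 ≤ hatvany, lists where i jumps from hatar-1 over hatar (hatar-1 in tomb but hatar not), so the
-- only exit test i == hatar never fires.  The 'hatvany ≤ 9' guard only keeps Pre_ quickly decidable
-- (no astronomical powers): for hatvany ≥ 10 every Dom-bounded element (|x| ≤ 2^31) is below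
-- 10^11 - 1, so the jump cannot occur.
def Pre_csokkenorendezes (tomb : List Int) (hatvany : Int) : Prop :=
  (-1 ≤ hatvany ∧ (hatvany ≤ 9 →
    (((10:Int) ^ (hatvany + 1).toNat - 1) ∈ tomb → ((10:Int) ^ (hatvany + 1).toNat) ∈ tomb)))
  ∨ hatvany ≤ -325
instance (tomb : List Int) (hatvany : Int) : Decidable (Pre_csokkenorendezes tomb hatvany) := by
  unfold Pre_csokkenorendezes; infer_instance

def pvWitness_csokkenorendezes : List Int × Int := ([3, 1, 1, 15], 0)

-- For hatvany ≤ -325 the float 10**(hatvany+1) underflows to exactly 0.0, so A accidentally returns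
-- the empty answer "A pozitív számok növekvő sorrendben: []" instead of rejecting the power; B
-- returns the intended invalid-power message it gives for every non-positive power.
def D_csokkenorendezes (tomb : List Int) (hatvany : Int) : Prop := hatvany ≤ -325
instance (tomb : List Int) (hatvany : Int) : Decidable (D_csokkenorendezes tomb hatvany) := by
  unfold D_csokkenorendezes; infer_instance

def Spec_csokkenorendezes (tomb : List Int) (hatvany : Int) (out : String) : Prop := ¬ D_csokkenorendezes tomb hatvany → out = csokkenorendezes_alt tomb hatvany
instance (tomb : List Int) (hatvany : Int) (out : String) : Decidable (Spec_csokkenorendezes tomb hatvany out) := by unfold Spec_csokkenorendezes; infer_instance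

def pvDiffWitness_csokkenorendezes : List Int × Int := ([], -325)
def pvDiffWitnessOut_csokkenorendezes : String × String :=
  ("A pozitív számok növekvő sorrendben: []",
   "Sajnos nem helyes hatványt adtál meg. Kérlek próbáld újra!")

-- ===== CLAIM (what is proved, stated in full; the proofs are below) =====
def Claim_unchanged_csokkenorendezes : Prop := ∀ (tomb : List Int) (hatvany : Int), Dom_csokkenorendezes tomb hatvany → Pre_csokkenorendezes tomb hatvany → Spec_csokkenorendezes tomb hatvany (csokkenorendezes tomb hatvany)
def Claim_changed_csokkenorendezes : Prop := Dom_csokkenorendezes (pvDiffWitness_csokkenorendezes.1) (pvDiffWitness_csokkenorendezes.2) ∧ Pre_csokkenorendezes (pvDiffWitness_csokkenorendezes.1) (pvDiffWitness_csokkenorendezes.2) ∧ D_csokkenorendezes (pvDiffWitness_csokkenorendezes.1) (pvDiffWitness_csokkenorendezes.2) ∧ csokkenorendezes (pvDiffWitness_csokkenorendezes.1) (pvDiffWitness_csokkenorendezes.2) = pvDiffWitnessOut_csokkenorendezes.1 ∧ csokkenorendezes_alt (pvDiffWitness_csokkenorendezes.1) (pvDiffWitness_csokkenorendezes.2) = pvDiffWitnessOut_csokkenorendezes.2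 ∧ pvDiffWitnessOut_csokkenorendezes.1 ≠ pvDiffWitnessOut_csokkenorendezes.2
def Claim_exact_csokkenorendezes : Prop := ∀ (tomb : List Int) (hatvany : Int), Dom_csokkenorendezes tomb hatvany → Pre_csokkenorendezes tomb hatvany → D_csokkenorendezes tomb hatvany → csokkenorendezes tomb hatvany ≠ csokkenorendezes_alt tomb hatvany

-- ===== LEMMAS AND PROOFS =====

-- the ascending list of integers in [i, hatar) that occur in tomb
def pvAsc (tomb : List Int) (hatar i : Int) : List Int :=
  ((List.range (hatar - i).toNat).map (fun k : Nat => i + (k : Int))).filter (fun x => tomb.contains x)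

lemma pvAsc_step (tomb : List Int) (hatar i : Int) (h : i < hatar) :
    pvAsc tomb hatar i =
      (if tomb.contains i then [i] else []) ++ pvAsc tomb hatar (i + 1) := by
  have hn : (hatar - i).toNat = (hatar - (i + 1)).toNat + 1 := by omega
  unfold pvAsc
  rw [hn, List.range_succ_eq_map, List.map_cons, List.filter_cons]
  simp only [List.map_map]
  have he : ((fun k : Nat => i + (k : Int)) ∘ Nat.succ) = fun k : Nat => (i + 1) + (k : Int) := by
    funext k; simp [Nat.succ_eq_add_one]; ring
  rw [he]
  by_cases hc : i ∈ tomb <;> simp [hc]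

lemma pvLoopA_eq (tomb : List Int) (hatar : Int)
    (hP : (hatar - 1) ∈ tomb → hatar ∈ tomb) :
    ∀ (fuel : Nat) (i : Int) (meg : List Int), 0 ≤ i → i ≤ hatar → (hatar - i).toNat < fuel →
      pvLoopA tomb hatar fuel i meg = meg ++ pvAsc tomb hatar i := by
  intro fuel
  induction fuel with
  | zero => intro i meg _ _ hf; omega
  | succ fuel ih =>
    intro i meg h0 hle hf
    by_cases hi : i = hatar
    · subst hi
      simp [pvLoopA, pvAsc]
    · have hlt : i < hatar := lt_of_le_of_ne hle hi
      rw [pvAsc_step tomb hatar i hlt]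
      by_cases hm : i ∈ tomb
      · by_cases hm1 : (i + 1) ∈ tomb
        · -- append i, advance by 1
          have hstep : pvLoopA tomb hatar (fuel + 1) i meg
              = pvLoopA tomb hatar fuel (i + 1) (meg ++ [i]) := by
            rw [pvLoopA, if_neg hi]; simp [hm, hm1]
          rw [hstep, ih (i + 1) (meg ++ [i]) (by omega) (by omega) (by omega)]
          simp [hm]
        · -- append i, advance by 2; i+1 = hatar is excluded by hP
          have hne : i + 1 ≠ hatar := by
            intro h
            have h1 : hatar - 1 ∈ tomb := by
              have hieq : i = hatar - 1 := by omega
              rw [← hieq]; exact hm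
            exact hm1 (by rw [h]; exact hP h1)
          have hlt2 : i + 1 < hatar := lt_of_le_of_ne (by omega) hne
          have hstep : pvLoopA tomb hatar (fuel + 1) i meg
              = pvLoopA tomb hatar fuel (i + 1 + 1) (meg ++ [i]) := by
            rw [pvLoopA, if_neg hi]; simp [hm, hm1]
          rw [hstep, ih (i + 1 + 1) (meg ++ [i]) (by omega) (by omega) (by omega)]
          rw [pvAsc_step tomb hatar (i + 1) hlt2]
          simp [hm, hm1]
      · -- skip i
        have hstep : pvLoopA tomb hatar (fuel + 1) i meg
            = pvLoopA tomb hatar fuel (i + 1) meg := by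
          rw [pvLoopA, if_neg hi]; simp [hm]
        rw [hstep, ih (i + 1) meg (by omega) (by omega) (by omega)]
        simp [hm]

lemma pvAsc_pairwise (tomb : List Int) (hatar i : Int) :
    (pvAsc tomb hatar i).Pairwise (· < ·) := by
  apply List.Pairwise.filter
  rw [List.pairwise_map]
  exact (List.pairwise_lt_range).imp (fun {a b} h => by omega)

lemma pvAsc_mem (tomb : List Int) (hatar i x : Int) :
    x ∈ pvAsc tomb hatar i ↔ (i ≤ x ∧ x < hatar ∧ x ∈ tomb) := by
  unfold pvAsc
  simp only [List.mem_filter, List.mem_map, List.mem_range, List.contains_iff_mem]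
  constructor
  · rintro ⟨⟨k, hk, rfl⟩, hmem⟩
    refine ⟨by omega, by omega, hmem⟩
  · rintro ⟨h1, h2, h3⟩
    exact ⟨⟨(x - i).toNat, by omega, by omega⟩, h3⟩

-- the central list identity: A's reversed scan list is B's descending sort of the filtered set
lemma pvAsc_reverse_eq (tomb : List Int) (hatar : Int) :
    (pvAsc tomb hatar 0).reverse =
      PySem.List.sorted
        (PySem.Set.ofList (tomb.filter (fun x => decide (0 ≤ x) && decide (x < hatar))))
        (fun x => x) true := by
  apply Eq.symm
  apply PySem.List.sorted_rev_eq_of_perm_of_pairwise_gt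
  · rw [List.perm_ext_iff_of_nodup]
    · intro a
      rw [List.mem_reverse, pvAsc_mem, PySem.Set.mem_ofList, List.mem_filter]
      simp only [Bool.and_eq_true, decide_eq_true_eq]
      tauto
    · exact (pvAsc_pairwise tomb hatar 0).reverse.nodup
    · exact PySem.Set.nodup_ofList _
  · exact (pvAsc_pairwise tomb hatar 0).reverse

-- ===== VERDICT (by name: the statements are the Claim_ definitions above) =====
theorem csokkenorendezes_spec : Claim_unchanged_csokkenorendezes := by
  intro tomb hatvany hdom hpre
  unfold Spec_csokkenorendezes
  intro hnD
  unfold D_csokkenorendezes at hnD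
  have hpre' : -1 ≤ hatvany ∧ (hatvany ≤ 9 →
      (((10:Int) ^ (hatvany + 1).toNat - 1) ∈ tomb → ((10:Int) ^ (hatvany + 1).toNat) ∈ tomb)) := by
    rcases hpre with h | h
    · exact h
    · omega
  obtain ⟨h1, h2⟩ := hpre'
  have hP : ((10:Int) ^ (hatvany + 1).toNat - 1) ∈ tomb → ((10:Int) ^ (hatvany + 1).toNat) ∈ tomb := by
    by_cases hle : hatvany ≤ 9
    · exact h2 hle
    · intro hmem
      exfalso
      unfold Dom_csokkenorendezes at hdom
      simp only [Bool.and_eq_true, List.all_eq_true, pvDomInt, decide_eq_true_eq] at hdom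
      have hx := (hdom.1 _ hmem).2
      have hn : 11 ≤ (hatvany + 1).toNat := by omega
      have hpow : (10:Int) ^ 11 ≤ 10 ^ (hatvany + 1).toNat := pow_le_pow_right₀ (by norm_num) hn
      norm_num at hpow
      omega
  unfold csokkenorendezes csokkenorendezes_alt
  have hneg : ¬ (hatvany + 1 < 0) := by omega
  simp only [if_neg hneg]
  by_cases hz : hatvany + 1 = 0
  · simp [hz]
  · have hnle : ¬ (hatvany + 1 ≤ 0) := by omega
    simp only [hz, if_false, hnle]
    have hhat : (1:Int) ≤ 10 ^ (hatvany + 1).toNat := one_le_pow₀ (by norm_num)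
    rw [pvLoopA_eq tomb _ hP _ 0 [] le_rfl (by omega) (by omega)]
    rw [List.nil_append, pvAsc_reverse_eq]
    simp

theorem csokkenorendezes_changed : Claim_changed_csokkenorendezes := by
  unfold Claim_changed_csokkenorendezes; decide

theorem csokkenorendezes_tight : Claim_exact_csokkenorendezes := by
  intro tomb hatvany _ _ hD
  unfold D_csokkenorendezes at hD
  unfold csokkenorendezes csokkenorendezes_alt
  rw [if_pos (by omega : hatvany + 1 < 0), if_pos (by omega : hatvany + 1 ≤ 0)]
  decide
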